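-- pv_equiv track=rewrite | github.com/ElonePMLin/Algorithm- | thief_IV.py | maxRoom
-- ===== SOURCE A (Python) =====
-- def maxRoom(nums, mx, k):  # 偷不大于mx钱时，最多需要偷多少间
--     f0, f1 = 0, 0
--     for x in nums:
--         if x > mx:
--             f0 = f1
--         else:
--             f0, f1 = f1, max(f1, f0 + 1)
--     return f1 >= k
-- ===== SOURCE B (Python) =====
-- def maxRoom(nums, mx, k):
--     # scan by maximal runs of eligible rooms: a run of length r contributes (r+1)//2
--     total = 0
--     i = 0
--     n = len(nums)
--     while i < n:
--         r = 0
--         while i + r < n and nums[i + r] <= mx: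
--             r += 1
--         total += (r + 1) // 2
--         i += r + 1
--     return total >= k
-- ===== Notes on version B (the rewrite author's own statement) =====
-- stated objective: alternative
-- what changed: Replaces the two-variable house-robber DP (f0/f1 with max) by an index-based run scan: an inner loop measures each maximal run of eligible rooms (x <= mx) and adds (r+1)//2 per run, skipping past the blocker.
import Mathlib
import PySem

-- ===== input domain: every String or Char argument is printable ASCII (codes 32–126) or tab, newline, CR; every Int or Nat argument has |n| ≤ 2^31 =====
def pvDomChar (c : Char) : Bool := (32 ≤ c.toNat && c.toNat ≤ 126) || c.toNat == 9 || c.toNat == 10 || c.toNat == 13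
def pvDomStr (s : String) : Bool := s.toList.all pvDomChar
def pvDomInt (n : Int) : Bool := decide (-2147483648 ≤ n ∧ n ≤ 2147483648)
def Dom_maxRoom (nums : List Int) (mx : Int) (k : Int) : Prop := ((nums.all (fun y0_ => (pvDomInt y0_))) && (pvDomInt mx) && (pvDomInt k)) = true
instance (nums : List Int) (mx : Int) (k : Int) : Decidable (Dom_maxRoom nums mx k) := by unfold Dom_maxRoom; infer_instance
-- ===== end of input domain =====

-- B replaces A's two-variable house-robber DP by a run scan: each maximal run of r
-- consecutive eligible rooms (x <= mx) contributes (r+1)//2; objective: alternative (same O(n)).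

-- ===== PORT A =====
-- one step of A's loop body over the state (f0, f1)
def maxRoomStepA (mx : Int) (f : Int × Int) (x : Int) : Int × Int :=
  if x > mx then (f.2, f.2) else (f.2, max f.2 (f.1 + 1))

def maxRoom (nums : List Int) (mx : Int) (k : Int) : Bool :=
  let f := nums.foldl (maxRoomStepA mx) (0, 0)
  decide (f.2 ≥ k)

-- ===== PORT B =====
-- Source B's inner while loop: length of the leading run of eligible rooms
def runLen (mx : Int) : List Int → Nat
  | [] => 0
  | x :: xs => if x ≤ mx then runLen mx xs + 1 else 0

-- Source B's outer while loop: add (r+1)//2 per run, skip past the run and its blocker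
def runTotal (mx : Int) (l : List Int) : Int :=
  match h : l with
  | [] => 0
  | _ :: _ =>
    let r := runLen mx l
    PySem.Int.floordiv ((r : Int) + 1) 2 + runTotal mx (l.drop (r + 1))
termination_by l.length
decreasing_by simp [h]

def maxRoom_alt (nums : List Int) (mx : Int) (k : Int) : Bool :=
  decide (runTotal mx nums ≥ k)

-- ===== PRECONDITION & SPEC =====
def Spec_maxRoom (nums : List Int) (mx : Int) (k : Int) (out : Bool) : Prop := out = maxRoom_alt nums mx k
instance (nums : List Int) (mx : Int) (k : Int) (out : Bool) : Decidable (Spec_maxRoom nums mx k out) := by unfold Spec_maxRoom; infer_instance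

-- ===== CLAIM (what is proved, stated in full; the proofs are below) =====
def Claim_equal_maxRoom : Prop := ∀ (nums : List Int) (mx : Int) (k : Int), Dom_maxRoom nums mx k → Spec_maxRoom nums mx k (maxRoom nums mx k)

-- ===== LEMMAS AND PROOFS =====

lemma runLen_le_length (mx : Int) (l : List Int) : runLen mx l ≤ l.length := by
  induction l with
  | nil => simp [runLen]
  | cons x xs ih => simp only [runLen, List.length_cons]; split <;> omega

-- the run itself: all eligible
lemma take_runLen_eligible (mx : Int) (l : List Int) :
    ∀ y ∈ l.take (runLen mx l), y ≤ mx := by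
  induction l with
  | nil => simp
  | cons x xs ih =>
    simp only [runLen]
    split
    · intro y hy
      rcases List.mem_cons.mp (by simpa using hy) with h | h
      · omega
      · exact ih y h
    · simp

-- the element after the run (if any) is a blocker
lemma drop_runLen_blocker (mx : Int) (l : List Int) :
    ∀ y rest, l.drop (runLen mx l) = y :: rest → y > mx := by
  induction l with
  | nil => simp
  | cons x xs ih =>
    simp only [runLen]
    split
    · intro y rest h; exact ih y rest h
    · intro y rest h
      simp only [List.drop] at h
      cases h; omega

-- folding A's step over an all-eligible block from a boundary state
lemma foldA_eligible (mx : Int) (l : List Int) (h : ∀ y ∈ l, y ≤ mx) :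
    ∀ (t : Int) (j : Nat),
      l.foldl (maxRoomStepA mx) (t + (j : Int) / 2, t + ((j : Int) + 1) / 2)
        = (t + ((j + l.length : Nat) : Int) / 2, t + (((j + l.length : Nat) : Int) + 1) / 2) := by
  induction l with
  | nil => intro t j; simp
  | cons x xs ih =>
    intro t j
    have hx : ¬ x > mx := by have := h x (List.mem_cons_self ..); omega
    simp only [List.foldl_cons, maxRoomStepA, if_neg hx]
    have hmax : max (t + ((j : Int) + 1) / 2) (t + (j : Int) / 2 + 1)
        = t + (((j + 1 : Nat) : Int) + 1) / 2 := by push_cast; omega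
    have hfst : t + ((j : Int) + 1) / 2 = t + ((j + 1 : Nat) : Int) / 2 := by push_cast; ring_nf
    rw [hmax, hfst, ih (fun y hy => h y (List.mem_cons_of_mem _ hy)) t (j + 1)]
    simp only [List.length_cons]
    congr 2 <;> push_cast <;> ring_nf

-- main invariant: from a boundary state (t, t), A's f1 ends at t + runTotal
lemma foldA_runTotal (mx : Int) (l : List Int) (t : Int) :
    (l.foldl (maxRoomStepA mx) (t, t)).2 = t + runTotal mx l := by
  match l with
  | [] => simp [runTotal]
  | x :: xs =>
    set L := x :: xs with hL
    set r := runLen mx L with hr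
    have hdecomp : L = L.take r ++ L.drop r := (List.take_append_drop r L).symm
    have helig := take_runLen_eligible mx L
    have hlen_take : (L.take r).length = r :=
      List.length_take_of_le (by simpa [hr] using runLen_le_length mx L)
    have hfold1 := foldA_eligible mx (L.take r) helig t 0
    simp only [Nat.zero_add, hlen_take] at hfold1
    norm_num at hfold1
    have hTot : runTotal mx L
        = PySem.Int.floordiv ((r : Int) + 1) 2 + runTotal mx (L.drop (r + 1)) := by
      conv_lhs => rw [runTotal]
    have hfd : PySem.Int.floordiv ((r : Int) + 1) 2 = ((r : Int) + 1) / 2 :=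
      PySem.Int.floordiv_eq_ediv_of_pos (by norm_num)
    conv_lhs => rw [hdecomp, List.foldl_append, hfold1]
    cases hrest : L.drop r with
    | nil =>
      have : L.drop (r + 1) = [] := by
        have := congrArg (List.drop 1) hrest; simpa [List.drop_drop, Nat.add_comm] using this
      simp [hTot, this, runTotal]
    | cons y rest =>
      have hy : y > mx := drop_runLen_blocker mx L y rest hrest
      have hrest1 : L.drop (r + 1) = rest := by
        have := congrArg (List.drop 1) hrest
        simpa [List.drop_drop, Nat.add_comm] using this
      have hlenrest : rest.length < L.length := by
        have h1 : (L.drop (r+1)).length = L.length - (r+1) := List.length_drop ..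
        rw [hrest1] at h1
        have : 0 < L.length := by simp [hL]
        omega
      simp only [List.foldl_cons, maxRoomStepA, if_pos hy]
      rw [foldA_runTotal mx rest (t + ((r : Int) + 1) / 2)]
      rw [hTot, hrest1, hfd]; ring
termination_by l.length
decreasing_by simpa [hL] using hlenrest

-- ===== VERDICT (by name: the statement is the Claim_ definition above) =====
theorem maxRoom_spec : Claim_equal_maxRoom := by
  intro nums mx k _
  unfold Spec_maxRoom maxRoom maxRoom_alt
  have key := foldA_runTotal mx nums 0
  simp only [zero_add] at key
  simp [key]
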